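-- pv_equiv track=rewrite | github.com/LineageOS/scripts | dev/apk/arsc_decode.py | decode_attr_flags
-- ===== SOURCE A (Python) =====
-- from typing import Dict, List, Optional, Tuple
--
-- def decode_attr_flags(value: int, values: List[Tuple[str, int]]):
--     flags: List[str] = []
--
--     if not value:
--         for flag_name, flag_value in values:
--             if not flag_value:
--                 flags.append(flag_name)
--
--         return flags, value
--
--     for flag_name, flag_value in values:
--         if flag_value != value:
--             continue
--
--         return [flag_name], value
--
--     value_from_flags = 0
--     for flag_name, flag_value in values:
--         if (value & flag_value) == flag_value:
--             value_from_flags |= flag_value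
--             flags.append(flag_name)
--
--     return flags, value_from_flags
-- ===== SOURCE B (Python) =====
-- def decode_attr_flags(value, values):
--     exact = None
--     flags = []
--     acc = 0
--     for name, fv in values:
--         if exact is None and value and fv == value:
--             exact = name
--         if (value & fv) == fv:
--             flags.append(name)
--             acc |= fv
--     if exact is not None:
--         return [exact], value
--     return flags, acc
-- ===== Notes on version B (the rewrite author's own statement) =====
-- stated objective: alternative
-- what changed: B replaces A's three staged loops with early returns (zero-flag collection, exact-match scan, subset accumulation) by one fused forward pass that simultaneously tracks the first exact match, the subset flag list and the OR-accumulator, and decides which result to return only at the end; the zero-value special case disappears because the subset test (0 & fv) == fv selects exactly the zero-valued flags.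
import Mathlib
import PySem

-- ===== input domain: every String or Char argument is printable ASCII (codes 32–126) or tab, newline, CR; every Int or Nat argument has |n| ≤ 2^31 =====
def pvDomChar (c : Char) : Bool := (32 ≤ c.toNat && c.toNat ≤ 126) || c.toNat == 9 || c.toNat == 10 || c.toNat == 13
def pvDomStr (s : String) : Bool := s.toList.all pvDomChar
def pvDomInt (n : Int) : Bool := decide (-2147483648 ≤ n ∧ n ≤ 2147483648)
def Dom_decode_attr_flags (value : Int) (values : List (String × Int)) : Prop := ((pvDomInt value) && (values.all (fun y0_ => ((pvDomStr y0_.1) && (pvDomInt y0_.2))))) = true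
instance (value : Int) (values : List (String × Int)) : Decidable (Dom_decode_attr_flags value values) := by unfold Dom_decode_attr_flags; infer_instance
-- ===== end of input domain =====

-- B fuses A's three staged loops into one forward pass tracking the exact match, the flag list and the OR-accumulator at once (alternative decomposition; same return value).

-- ===== PORT A =====
-- the `if not value:` loop: collect names with flag_value == 0
def aZeroLoop : List (String × Int) → List String → List String
  | [], flags => flags
  | (n, fv) :: rest, flags =>
    if fv == 0 then aZeroLoop rest (flags ++ [n]) else aZeroLoop rest flags

-- the exact-match loop with `continue` / early return
def aExactLoop (value : Int) : List (String × Int) → Option String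
  | [] => none
  | (n, fv) :: rest => if fv != value then aExactLoop value rest else some n

-- the final subset loop over value_from_flags and flags
def aSubsetLoop (value : Int) : List (String × Int) → Int → List String → List String × Int
  | [], vff, flags => (flags, vff)
  | (n, fv) :: rest, vff, flags =>
    if (PySem.Int.band value fv) == fv then
      aSubsetLoop value rest (PySem.Int.bor vff fv) (flags ++ [n])
    else
      aSubsetLoop value rest vff flags

def decode_attr_flags (value : Int) (values : List (String × Int)) : List String × Int :=
  if value == 0 then (aZeroLoop values [], value)
  else
    match aExactLoop value values with
    | some n => ([n], value)
    | none => aSubsetLoop value values 0 []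

-- ===== PORT B =====
-- one loop body: state = (exact, flags, acc)
def bStep (value : Int) (s : Option String × List String × Int) (p : String × Int) :
    Option String × List String × Int :=
  let exact := if s.1 == none && value != 0 && p.2 == value then some p.1 else s.1
  if (PySem.Int.band value p.2) == p.2 then (exact, s.2.1 ++ [p.1], PySem.Int.bor s.2.2 p.2)
  else (exact, s.2.1, s.2.2)

def decode_attr_flags_alt (value : Int) (values : List (String × Int)) : List String × Int :=
  match values.foldl (bStep value) (none, [], 0) with
  | (some n, _, _) => ([n], value)
  | (none, flags, acc) => (flags, acc)

-- ===== PRECONDITION & SPEC =====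
def Spec_decode_attr_flags (value : Int) (values : List (String × Int)) (out : List String × Int) : Prop := out = decode_attr_flags_alt value values
instance (value : Int) (values : List (String × Int)) (out : List String × Int) : Decidable (Spec_decode_attr_flags value values out) := by unfold Spec_decode_attr_flags; infer_instance

-- ===== CLAIM (what is proved, stated in full; the proofs are below) =====
def Claim_equal_decode_attr_flags : Prop := ∀ (value : Int) (values : List (String × Int)), Dom_decode_attr_flags value values → Spec_decode_attr_flags value values (decode_attr_flags value values)

-- ===== LEMMAS AND PROOFS =====

theorem band_zero_left (a : Int) : PySem.Int.band 0 a = 0 := by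
  simp [PySem.Int.band]

-- the exact-match component of B's fold is A's exact-match loop (value ≠ 0),
-- and the flag/acc components never feed back into it
theorem bFold_fst (value : Int) (hv : value ≠ 0) (l : List (String × Int))
    (flags : List String) (acc : Int) :
    (l.foldl (bStep value) (none, flags, acc)).1 = aExactLoop value l := by
  induction l generalizing flags acc with
  | nil => rfl
  | cons p rest ih =>
    obtain ⟨n, fv⟩ := p
    by_cases h : fv = value
    · have hfix : ∀ (fl : List String) (a : Int),
          (rest.foldl (bStep value) (some n, fl, a)).1 = some n := by
        intro fl a
        clear ih
        induction rest generalizing fl a with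
        | nil => rfl
        | cons q r ihr =>
          simp only [List.foldl_cons, bStep]
          split <;> exact ihr _ _
      have hg : ((none : Option String) == none && value != 0 && fv == value) = true := by
        simp [h, hv]
      have hne : (fv != value) = false := by simp [h]
      simp only [List.foldl_cons, bStep, aExactLoop]
      rw [hg, hne]
      simp only [if_true]
      split <;> simpa using hfix _ _
    · simp only [List.foldl_cons, bStep, aExactLoop]
      have hg : ((none : Option String) == none && value != 0 && fv == value) = false := by
        simp [h]
      rw [hg]
      have hne : (fv != value) = true := by simp [h]
      rw [hne]
      simp only [if_false, if_true]
      split <;> exact ih _ _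

-- the exact-match component stays none when value = 0
theorem bFold_fst_zero (l : List (String × Int)) (flags : List String) (acc : Int) :
    (l.foldl (bStep 0) (none, flags, acc)).1 = none := by
  induction l generalizing flags acc with
  | nil => rfl
  | cons p rest ih =>
    simp only [List.foldl_cons, bStep]
    split <;> simpa using ih _ _

-- the flag/acc components of B's fold are A's subset loop (any exact state m0)
theorem bFold_snd (value : Int) (l : List (String × Int)) (m0 : Option String)
    (flags : List String) (acc : Int) :
    (l.foldl (bStep value) (m0, flags, acc)).2 = aSubsetLoop value l acc flags := by
  induction l generalizing m0 flags acc with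
  | nil => rfl
  | cons p rest ih =>
    obtain ⟨n, fv⟩ := p
    simp only [List.foldl_cons, bStep, aSubsetLoop]
    by_cases h : PySem.Int.band value fv = fv
    · simp only [h, beq_self_eq_true, if_true]
      exact ih _ _ _
    · have : (PySem.Int.band value fv == fv) = false := by simpa using h
      rw [this]
      exact ih _ _ _

-- at value = 0, A's subset loop with acc 0 is A's zero loop paired with 0
theorem aSubsetLoop_zero (l : List (String × Int)) (flags : List String) :
    aSubsetLoop 0 l 0 flags = (aZeroLoop l flags, 0) := by
  induction l generalizing flags with
  | nil => rfl
  | cons p rest ih =>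
    obtain ⟨n, fv⟩ := p
    by_cases h : fv = 0
    · subst h
      have hb : PySem.Int.band 0 0 = 0 := band_zero_left 0
      have ho : PySem.Int.bor 0 0 = 0 := by decide
      simp [aSubsetLoop, aZeroLoop, ho, ih]
    · have hb : ¬ (PySem.Int.band 0 fv = fv) := by
        rw [band_zero_left]; exact fun e => h e.symm
      simp [aSubsetLoop, aZeroLoop, h, hb, ih]

-- ===== VERDICT (by name: the statement is the Claim_ definition above) =====
theorem decode_attr_flags_spec : Claim_equal_decode_attr_flags := by
  intro value values _
  unfold Spec_decode_attr_flags decode_attr_flags decode_attr_flags_alt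
  rcases hs : values.foldl (bStep value) (none, [], 0) with ⟨m, fl, ac⟩
  by_cases hv : value = 0
  · subst hv
    have hm : m = none := by
      have := bFold_fst_zero values [] 0
      rw [hs] at this; exact this
    have hsub : (fl, ac) = aSubsetLoop 0 values 0 [] := by
      have := bFold_snd 0 values none [] 0
      rw [hs] at this; exact this
    rw [aSubsetLoop_zero] at hsub
    subst hm
    simp only [beq_self_eq_true, if_true]
    exact hsub.symm
  · have hb : (value == 0) = false := by simpa using hv
    have hm : m = aExactLoop value values := by
      have := bFold_fst value hv values [] 0
      rw [hs] at this; exact this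
    have hsub : (fl, ac) = aSubsetLoop value values 0 [] := by
      have := bFold_snd value values none [] 0
      rw [hs] at this; exact this
    rw [hb]
    cases h : aExactLoop value values with
    | some n => rw [h] at hm; subst hm; simp
    | none =>
      rw [h] at hm; subst hm
      simp only [Bool.false_eq_true, if_false, ← hsub]
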